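-- pv_equiv track=rewrite | github.com/Se-cloudy/LeetcodeLearn | 经典面试题/贪心-划分字母区间.py | func
-- ===== SOURCE A (Python) =====
-- from typing import List
--
-- def func(s: str) -> List[int]:
--     res = []
--     last = [0] * 26  # 初始化在哪里都是好习惯！
--     for i, c in enumerate(s):
--         last[ord(c)-ord('a')] = i  # 必须这样写。
--
--     start = end = 0
--     for i, c in enumerate(s):
--         end = max(last[ord(c)-ord('a')], end)
--         if i == end:
--             res.append(end-start+1)
--             start = end + 1
--     return res
-- ===== SOURCE B (Python) =====
-- def func(s):
--     # Counting/disjointness algorithm: a prefix [start..i] is a complete part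
--     # exactly when every letter seen so far has no remaining occurrence to the right.
--     res = []
--     seen = [False] * 26
--     remaining = [0] * 26
--     for c in s:
--         remaining[ord(c) - ord('a')] += 1
--     start = 0
--     for i, c in enumerate(s):
--         k = ord(c) - ord('a')
--         seen[k] = True
--         remaining[k] -= 1
--         if all(remaining[j] == 0 for j in range(26) if seen[j]):
--             res.append(i - start + 1)
--             start = i + 1
--     return res
-- ===== Notes on version B (the rewrite author's own statement) =====
-- stated objective: alternative
-- what changed: Replaces A's last-occurrence array plus running max-end pointer with a counting scheme: one pass builds per-letter remaining counts, then the scan decrements counts and cuts a part exactly when every letter seen so far has zero remaining occurrences (prefix/suffix disjointness), with no last[] array and no end pointer.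
import Mathlib
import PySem

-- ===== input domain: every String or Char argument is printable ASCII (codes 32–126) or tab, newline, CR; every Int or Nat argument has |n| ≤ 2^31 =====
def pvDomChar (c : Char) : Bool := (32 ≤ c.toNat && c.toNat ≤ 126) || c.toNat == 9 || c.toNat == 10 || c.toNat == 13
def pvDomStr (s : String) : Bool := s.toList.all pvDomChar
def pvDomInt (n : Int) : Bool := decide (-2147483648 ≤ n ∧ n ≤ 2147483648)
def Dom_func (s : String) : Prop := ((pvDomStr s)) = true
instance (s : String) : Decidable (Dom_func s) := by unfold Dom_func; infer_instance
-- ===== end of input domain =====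

-- B replaces A's last-occurrence array + running max-end pointer by remaining-occurrence
-- counts with a prefix/suffix-disjointness cut test (objective: alternative algorithm, same cost class).

-- ===== PORT A =====
-- ord(c) - ord('a')
def pvKey (c : Char) : Int := (c.toNat : Int) - 97

-- for i, c in enumerate(s): last[ord(c)-ord('a')] = i
def pvLastLoop : List Char → Nat → List Int → List Int
  | [], _, last => last
  | c :: cs, i, last => pvLastLoop cs (i + 1) (PySem.List.pySetD last (pvKey c) (i : Int))

-- second loop of A: end = max(last[...], end); if i == end: res.append(end-start+1); start = end+1
def pvAGo : List Int → List Char → Nat → List Int → Int → Int → List Int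
  | _, [], _, res, _, _ => res
  | last, c :: cs, i, res, start, e =>
    let e' := max (PySem.List.pyGetD last (pvKey c) 0) e
    if (i : Int) = e' then pvAGo last cs (i + 1) (res ++ [e' - start + 1]) (e' + 1) e'
    else pvAGo last cs (i + 1) res start e'

def func (s : String) : List Int :=
  pvAGo (pvLastLoop s.toList 0 (List.replicate 26 0)) s.toList 0 [] 0 0

-- ===== PORT B =====
-- for c in s: remaining[ord(c)-ord('a')] += 1
def pvRemLoop : List Char → List Int → List Int
  | [], rem => rem
  | c :: cs, rem =>
      pvRemLoop cs (PySem.List.pySetD rem (pvKey c) (PySem.List.pyGetD rem (pvKey c) 0 + 1))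

-- all(remaining[j] == 0 for j in range(26) if seen[j])
def pvAllDone (seen : List Bool) (rem : List Int) : Bool :=
  (PySem.List.pyRange 0 26 1).all
    (fun j => !(PySem.List.pyGetD seen j false) || (PySem.List.pyGetD rem j 0 == 0))

-- second loop of B
def pvBGo : List Char → Nat → List Int → Int → List Bool → List Int → List Int
  | [], _, res, _, _, _ => res
  | c :: cs, i, res, start, seen, rem =>
    let k := pvKey c
    let seen' := PySem.List.pySetD seen k true
    let rem' := PySem.List.pySetD rem k (PySem.List.pyGetD rem k 0 - 1)
    if pvAllDone seen' rem' then
      pvBGo cs (i + 1) (res ++ [(i : Int) - start + 1]) ((i : Int) + 1) seen' rem'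
    else pvBGo cs (i + 1) res start seen' rem'

def func_alt (s : String) : List Int :=
  pvBGo s.toList 0 [] 0 (List.replicate 26 false) (pvRemLoop s.toList (List.replicate 26 0))

-- ===== PRECONDITION & SPEC =====
-- Pre_ excludes exactly the strings on which the Python A (and B) raises IndexError:
-- a character c with ord(c)-ord('a') outside [-26, 25], i.e. ord(c) outside [71, 122].
def Pre_func (s : String) : Prop :=
  (s.toList.all fun c => 71 ≤ c.toNat && c.toNat ≤ 122) = true
instance (s : String) : Decidable (Pre_func s) := by unfold Pre_func; infer_instance

def pvWitness_func : String := "ababcbGcd"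

def Spec_func (s : String) (out : List Int) : Prop := out = func_alt s
instance (s : String) (out : List Int) : Decidable (Spec_func s out) := by unfold Spec_func; infer_instance

-- ===== CLAIM (what is proved, stated in full; the proofs are below) =====
def Claim_equal_func : Prop := ∀ (s : String), Dom_func s → Pre_func s → Spec_func s (func s)

-- ===== LEMMAS AND PROOFS =====

-- getD after set, for an in-range set index
lemma pvGetD_set {α : Type} (l : List α) (n : Nat) (a : α) (m : Nat) (d : α) (h : n < l.length) :
    (l.set n a).getD m d = if m = n then a else l.getD m d := by
  rcases eq_or_ne m n with rfl | hne
  · simp [List.getD_eq_getElem?_getD, h]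
  · simp only [List.getD_eq_getElem?_getD, List.getElem?_set,
      if_neg (fun h' : n = m => hne h'.symm)]
    rw [if_neg hne]

-- the effective (wrapped) index Python uses for last[ord(c)-ord('a')]
def wk (c : Char) : Nat := if c.toNat < 97 then c.toNat + 26 - 97 else c.toNat - 97

lemma wk_lt (c : Char) (h1 : 71 ≤ c.toNat) (h2 : c.toNat ≤ 122) : wk c < 26 := by
  unfold wk; split <;> omega

lemma pySetD_bridge {α : Type} (xs : List α) (hx : xs.length = 26) (c : Char)
    (h1 : 71 ≤ c.toNat) (h2 : c.toNat ≤ 122) (v : α) :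
    PySem.List.pySetD xs (pvKey c) v = xs.set (wk c) v := by
  simp only [PySem.List.pySetD, PySem.List.pySet?, PySem.List.pyIdx?, pvKey, wk, hx]
  rcases Nat.lt_or_ge c.toNat 97 with h | h
  · rw [if_neg (by omega), if_pos (by push_cast; omega)]
    simp only [Option.map_some, Option.getD_some, if_pos h]
    congr 1
    omega
  · rw [if_pos (by omega), if_pos (by omega)]
    simp only [Option.map_some, Option.getD_some, if_neg (by omega : ¬ c.toNat < 97)]
    congr 1
    omega

lemma pyGetD_bridge {α : Type} (xs : List α) (hx : xs.length = 26) (c : Char)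
    (h1 : 71 ≤ c.toNat) (h2 : c.toNat ≤ 122) (d : α) :
    PySem.List.pyGetD xs (pvKey c) d = xs.getD (wk c) d := by
  have hw : wk c < 26 := wk_lt c h1 h2
  rcases Nat.lt_or_ge c.toNat 97 with h | h
  · have hkey : pvKey c = -((97 - c.toNat : Nat) : Int) := by unfold pvKey; omega
    rw [hkey, PySem.List.pyGetD_neg_natCast xs _ d (by omega) (by omega)]
    rw [List.getD_eq_getElem _ _ (by omega : wk c < xs.length)]
    congr 1
    unfold wk; rw [if_pos h]; omega
  · have hkey : pvKey c = ((c.toNat - 97 : Nat) : Int) := by unfold pvKey; omega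
    rw [hkey, PySem.List.pyGetD_natCast]
    congr 1
    unfold wk; rw [if_neg (by omega)]

-- ===== generic (Nat-indexed) forms of the two loops =====

def gLast : List Nat → Nat → List Int → List Int
  | [], _, last => last
  | k :: ks, i, last => gLast ks (i + 1) (last.set k (i : Int))

def gAGo : List Int → List Nat → Nat → List Int → Int → Int → List Int
  | _, [], _, res, _, _ => res
  | last, k :: ks, i, res, start, e =>
    if (i : Int) = max (last.getD k 0) e then
      gAGo last ks (i + 1) (res ++ [max (last.getD k 0) e - start + 1]) (max (last.getD k 0) e + 1)
        (max (last.getD k 0) e)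
    else gAGo last ks (i + 1) res start (max (last.getD k 0) e)

def gRem : List Nat → List Int → List Int
  | [], rem => rem
  | k :: ks, rem => gRem ks (rem.set k (rem.getD k 0 + 1))

def gAllDone (seen : List Bool) (rem : List Int) : Bool :=
  (List.range 26).all (fun j => !(seen.getD j false) || (rem.getD j 0 == 0))

def gBGo : List Nat → Nat → List Int → Int → List Bool → List Int → List Int
  | [], _, res, _, _, _ => res
  | k :: ks, i, res, start, seen, rem =>
    if gAllDone (seen.set k true) (rem.set k (rem.getD k 0 - 1)) then
      gBGo ks (i + 1) (res ++ [(i : Int) - start + 1]) ((i : Int) + 1) (seen.set k true)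
        (rem.set k (rem.getD k 0 - 1))
    else gBGo ks (i + 1) res start (seen.set k true) (rem.set k (rem.getD k 0 - 1))

-- the common reference: cut exactly when the processed prefix is letter-disjoint from the rest
def cutAt (ks : List Nat) (i : Nat) : Bool :=
  decide (∀ k ∈ ks.take (i + 1), k ∉ ks.drop (i + 1))

def refGo (ks : List Nat) : List Nat → Nat → List Int → Int → List Int
  | [], _, res, _ => res
  | _ :: rest, i, res, start =>
    if cutAt ks i then refGo ks rest (i + 1) (res ++ [(i : Int) - start + 1]) ((i : Int) + 1)
    else refGo ks rest (i + 1) res start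

-- ===== ports reduce to the generic forms under Pre_ =====

lemma pvLastLoop_eq : ∀ (cs : List Char) (i : Nat) (arr : List Int),
    (∀ c ∈ cs, 71 ≤ c.toNat ∧ c.toNat ≤ 122) → arr.length = 26 →
    pvLastLoop cs i arr = gLast (cs.map wk) i arr := by
  intro cs
  induction cs with
  | nil => intros; rfl
  | cons c cs ih =>
    intro i arr hb hlen
    rw [List.map_cons]
    show pvLastLoop cs (i + 1) (PySem.List.pySetD arr (pvKey c) (i : Int)) = _
    rw [pySetD_bridge arr hlen c (hb c (by simp)).1 (hb c (by simp)).2]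
    exact ih (i + 1) _ (fun c' hc' => hb c' (by simp [hc'])) (by simp [hlen])

lemma pvAGo_eq (last : List Int) (hlen : last.length = 26) :
    ∀ (cs : List Char) (i : Nat) (res : List Int) (start e : Int),
    (∀ c ∈ cs, 71 ≤ c.toNat ∧ c.toNat ≤ 122) →
    pvAGo last cs i res start e = gAGo last (cs.map wk) i res start e := by
  intro cs
  induction cs with
  | nil => intros; rfl
  | cons c cs ih =>
    intro i res start e hb
    rw [List.map_cons]
    show (if (i : Int) = max (PySem.List.pyGetD last (pvKey c) 0) e then _ else _) = _
    rw [pyGetD_bridge last hlen c (hb c (by simp)).1 (hb c (by simp)).2]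
    show (if (i : Int) = max (last.getD (wk c) 0) e then
        pvAGo last cs (i + 1) (res ++ [max (last.getD (wk c) 0) e - start + 1])
          (max (last.getD (wk c) 0) e + 1) (max (last.getD (wk c) 0) e)
      else pvAGo last cs (i + 1) res start (max (last.getD (wk c) 0) e)) = _
    have hb' : ∀ c' ∈ cs, 71 ≤ c'.toNat ∧ c'.toNat ≤ 122 := fun c' hc' => hb c' (by simp [hc'])
    show _ = gAGo last (wk c :: cs.map wk) i res start e
    simp only [gAGo]
    split <;> rw [ih _ _ _ _ hb']

lemma pvRemLoop_eq : ∀ (cs : List Char) (rem : List Int),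
    (∀ c ∈ cs, 71 ≤ c.toNat ∧ c.toNat ≤ 122) → rem.length = 26 →
    pvRemLoop cs rem = gRem (cs.map wk) rem := by
  intro cs
  induction cs with
  | nil => intros; rfl
  | cons c cs ih =>
    intro rem hb hlen
    rw [List.map_cons]
    show pvRemLoop cs
        (PySem.List.pySetD rem (pvKey c) (PySem.List.pyGetD rem (pvKey c) 0 + 1)) = _
    rw [pySetD_bridge rem hlen c (hb c (by simp)).1 (hb c (by simp)).2,
        pyGetD_bridge rem hlen c (hb c (by simp)).1 (hb c (by simp)).2]
    exact ih _ (fun c' hc' => hb c' (by simp [hc'])) (by simp [hlen])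

lemma pvAllDone_eq (seen : List Bool) (rem : List Int) :
    pvAllDone seen rem = gAllDone seen rem := by
  unfold pvAllDone gAllDone
  have h : PySem.List.pyRange 0 26 1 = (List.range 26).map (fun k => (k : Int)) := by
    have h := PySem.List.pyRange_zero_natCast 26
    norm_num at h ⊢
    exact h
  rw [h, List.all_map]
  simp [Function.comp_def]

lemma pvBGo_eq : ∀ (cs : List Char) (i : Nat) (res : List Int) (start : Int)
    (seen : List Bool) (rem : List Int),
    (∀ c ∈ cs, 71 ≤ c.toNat ∧ c.toNat ≤ 122) → seen.length = 26 → rem.length = 26 →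
    pvBGo cs i res start seen rem = gBGo (cs.map wk) i res start seen rem := by
  intro cs
  induction cs with
  | nil => intros; rfl
  | cons c cs ih =>
    intro i res start seen rem hb hs hr
    rw [List.map_cons]
    have h1 := (hb c (by simp)).1
    have h2 := (hb c (by simp)).2
    show (if pvAllDone (PySem.List.pySetD seen (pvKey c) true)
            (PySem.List.pySetD rem (pvKey c) (PySem.List.pyGetD rem (pvKey c) 0 - 1)) then _
          else _) = _
    rw [pySetD_bridge seen hs c h1 h2, pySetD_bridge rem hr c h1 h2,
        pyGetD_bridge rem hr c h1 h2, pvAllDone_eq]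
    have hb' : ∀ c' ∈ cs, 71 ≤ c'.toNat ∧ c'.toNat ≤ 122 := fun c' hc' => hb c' (by simp [hc'])
    show _ = gBGo (wk c :: cs.map wk) i res start seen rem
    simp only [gBGo]
    split <;> rw [ih _ _ _ _ _ hb' (by simp [hs]) (by simp [hr])]

-- ===== facts about gLast =====

lemma length_gLast : ∀ (ks : List Nat) (i : Nat) (arr : List Int),
    (gLast ks i arr).length = arr.length := by
  intro ks
  induction ks with
  | nil => intros; rfl
  | cons k ks ih => intro i arr; rw [gLast, ih]; simp

lemma gLast_append : ∀ (ks : List Nat) (k : Nat) (i : Nat) (arr : List Int),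
    gLast (ks ++ [k]) i arr = (gLast ks i arr).set k ((i + ks.length : Nat) : Int) := by
  intro ks
  induction ks with
  | nil => intro k i arr; simp [gLast]
  | cons k' ks ih =>
    intro k i arr
    show gLast (ks ++ [k]) (i + 1) (arr.set k' (i : Int)) = _
    rw [ih]
    show _ = (gLast ks (i + 1) (arr.set k' (i : Int))).set k _
    congr 1
    simp only [List.length_cons]
    push_cast
    ring

lemma gLast_getD_nonneg : ∀ (ks : List Nat) (i : Nat) (arr : List Int),
    (∀ x ∈ arr, 0 ≤ x) → ∀ k, 0 ≤ (gLast ks i arr).getD k 0 := by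
  have base : ∀ (l : List Int), (∀ x ∈ l, 0 ≤ x) → ∀ k, 0 ≤ l.getD k 0 := by
    intro l hl k
    by_cases hk : k < l.length
    · rw [List.getD_eq_getElem _ _ hk]; exact hl _ (List.getElem_mem hk)
    · rw [List.getD_eq_default _ _ (by omega)]
  intro ks
  induction ks with
  | nil => intro i arr h k; exact base arr h k
  | cons k' ks ih =>
    intro i arr h k
    refine ih (i + 1) _ ?_ k
    intro x hx
    rcases List.mem_or_eq_of_mem_set hx with hx' | rfl
    · exact h x hx'
    · positivity

lemma gLast_le_iff : ∀ (ks : List Nat), (∀ k ∈ ks, k < 26) → ∀ k, k ∈ ks → ∀ i : Nat,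
    ((gLast ks 0 (List.replicate 26 0)).getD k 0 ≤ (i : Int) ↔ k ∉ ks.drop (i + 1)) := by
  intro ks
  induction ks using List.reverseRecOn with
  | nil => simp
  | append_singleton xs k' ih =>
    intro hk k hkm i
    have hk'26 : k' < 26 := hk k' (by simp)
    rw [gLast_append, pvGetD_set _ _ _ _ _ (by rw [length_gLast]; simpa using hk'26)]
    rcases eq_or_ne k k' with rfl | hne
    · rw [if_pos rfl]
      rcases Nat.lt_or_ge i xs.length with hlt | hge
      · have hmem : k ∈ (xs ++ [k]).drop (i + 1) := by
          rw [List.drop_append, Nat.sub_eq_zero_of_le (by omega)]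
          simp
        simp only [hmem, not_true_eq_false, iff_false, not_le]
        push_cast
        omega
      · have hnil : (xs ++ [k]).drop (i + 1) = [] :=
          List.drop_eq_nil_of_le (by simp; omega)
        rw [hnil]
        simp
        omega
    · rw [if_neg hne]
      have hin : k ∈ xs := by
        rcases List.mem_append.mp hkm with h | h
        · exact h
        · exact absurd (List.mem_singleton.mp h) hne
      rw [ih (fun a ha => hk a (by simp [ha])) k hin i]
      rw [List.drop_append]
      have hnot : k ∉ [k'].drop (i + 1 - xs.length) :=
        fun hmem => hne (List.mem_singleton.mp (List.mem_of_mem_drop hmem))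
      simp [List.mem_append, hnot]

lemma gLast_ge (ks : List Nat) (hk : ∀ k ∈ ks, k < 26) (pre : List Nat) (k : Nat)
    (rest : List Nat) (h : ks = pre ++ k :: rest) :
    (pre.length : Int) ≤ (gLast ks 0 (List.replicate 26 0)).getD k 0 := by
  have hkm : k ∈ ks := by rw [h]; simp
  cases hp : pre.length with
  | zero =>
    simp only [Nat.cast_zero]
    exact gLast_getD_nonneg ks 0 _ (by intro x hx; rw [List.eq_of_mem_replicate hx]) k
  | succ m =>
    by_contra hcon
    rw [Int.not_le] at hcon
    have hle : (gLast ks 0 (List.replicate 26 0)).getD k 0 ≤ (m : Int) := by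
      omega
    rw [gLast_le_iff ks hk k hkm m] at hle
    apply hle
    have : ks.drop pre.length = k :: rest := by rw [h, List.drop_left]
    rw [hp] at this
    rw [this]
    simp

-- ===== folded max =====

lemma foldl_max_le_iff (f : Nat → Int) : ∀ (l : List Nat) (a x : Int),
    (l.foldl (fun e k => max (f k) e) a ≤ x) ↔ a ≤ x ∧ ∀ k ∈ l, f k ≤ x := by
  intro l
  induction l with
  | nil => simp
  | cons k l ih =>
    intro a x
    rw [List.foldl_cons, ih]
    simp only [List.mem_cons, max_le_iff]
    constructor
    · rintro ⟨⟨h1, h2⟩, h3⟩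
      exact ⟨h2, fun k' hk' => by rcases hk' with rfl | hk' <;> [exact h1; exact h3 k' hk']⟩
    · rintro ⟨h1, h2⟩
      exact ⟨⟨h2 k (Or.inl rfl), h1⟩, fun k' hk' => h2 k' (Or.inr hk')⟩

-- ===== prefix/suffix decomposition =====

lemma take_pre (ks pre rest : List Nat) (k : Nat) (h : ks = pre ++ k :: rest) :
    ks.take (pre.length + 1) = pre ++ [k] := by
  rw [h, List.take_append, List.take_of_length_le (by omega), Nat.add_sub_cancel_left]
  simp

lemma drop_pre (ks pre rest : List Nat) (k : Nat) (h : ks = pre ++ k :: rest) :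
    ks.drop (pre.length + 1) = rest := by
  rw [h, List.drop_append, List.drop_eq_nil_of_le (by omega), Nat.add_sub_cancel_left]
  simp

-- ===== the A loop computes refGo =====

lemma gAGo_ref (ks : List Nat) (hk : ∀ k ∈ ks, k < 26) :
    ∀ (rest pre : List Nat) (res : List Int) (start e : Int),
      ks = pre ++ rest →
      e = pre.foldl (fun e k => max ((gLast ks 0 (List.replicate 26 0)).getD k 0) e) 0 →
      gAGo (gLast ks 0 (List.replicate 26 0)) rest pre.length res start e
        = refGo ks rest pre.length res start := by
  intro rest
  induction rest with
  | nil => intros; rfl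
  | cons k rest ih =>
    intro pre res start e hks he
    have hLlen : (gLast ks 0 (List.replicate 26 0)).length = 26 := by
      rw [length_gLast]; simp
    set L := gLast ks 0 (List.replicate 26 0) with hL
    have hge0 : (pre.length : Int) ≤ L.getD k 0 := gLast_ge ks hk pre k rest hks
    have he' : max (L.getD k 0) e
        = (pre ++ [k]).foldl (fun e k => max (L.getD k 0) e) 0 := by
      rw [List.foldl_append, ← he]
      simp
    have hmemks : ∀ k' ∈ pre ++ [k], k' ∈ ks := by
      intro k' hk'
      rw [hks]
      rcases List.mem_append.mp hk' with h | h
      · exact List.mem_append.mpr (Or.inl h)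
      · rw [List.mem_singleton.mp h]; simp
    have hcond : ((pre.length : Int) = max (L.getD k 0) e) ↔ cutAt ks pre.length = true := by
      rw [cutAt, decide_eq_true_iff, take_pre ks pre rest k hks]
      constructor
      · intro hEq k' hk'
        have h1 : (pre ++ [k]).foldl (fun e k => max (L.getD k 0) e) 0 ≤ (pre.length : Int) := by
          rw [← he', ← hEq]
        rw [foldl_max_le_iff] at h1
        exact (gLast_le_iff ks hk k' (hmemks k' hk') pre.length).mp (h1.2 k' hk')
      · intro hall
        have h2 : ∀ k' ∈ pre ++ [k], L.getD k' 0 ≤ (pre.length : Int) := by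
          intro k' hk'
          rw [gLast_le_iff ks hk k' (hmemks k' hk') pre.length]
          exact hall k' hk'
        have h3 : (pre ++ [k]).foldl (fun e k => max (L.getD k 0) e) 0 ≤ (pre.length : Int) :=
          (foldl_max_le_iff _ _ _ _).mpr ⟨Int.natCast_nonneg _, h2⟩
        rw [← he'] at h3
        have h4 := le_max_left (L.getD k 0) e
        omega
    have hks' : ks = (pre ++ [k]) ++ rest := by rw [hks]; simp
    have hlen' : (pre ++ [k]).length = pre.length + 1 := by simp
    show (if (pre.length : Int) = max (L.getD k 0) e then _ else _) = _
    by_cases hc : (pre.length : Int) = max (L.getD k 0) e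
    · rw [if_pos hc]
      show _ = refGo ks (k :: rest) pre.length res start
      rw [refGo, if_pos (hcond.mp hc)]
      have := ih (pre ++ [k]) (res ++ [max (L.getD k 0) e - start + 1])
        (max (L.getD k 0) e + 1) (max (L.getD k 0) e) hks' he'
      rw [hlen'] at this
      rw [this, ← hc]
    · rw [if_neg hc]
      show _ = refGo ks (k :: rest) pre.length res start
      rw [refGo, if_neg (fun hcut => hc (hcond.mpr hcut))]
      have := ih (pre ++ [k]) res start (max (L.getD k 0) e) hks' he'
      rw [hlen'] at this
      exact this

-- ===== gRem counts the remaining occurrences =====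

lemma length_gRem : ∀ (ks : List Nat) (rem : List Int), (gRem ks rem).length = rem.length := by
  intro ks
  induction ks with
  | nil => intros; rfl
  | cons k ks ih => intro rem; rw [gRem, ih]; simp

lemma gRem_getD : ∀ (ks : List Nat), (∀ k ∈ ks, k < 26) → ∀ (rem : List Int),
    rem.length = 26 → ∀ j, (gRem ks rem).getD j 0 = rem.getD j 0 + (ks.count j : Int) := by
  intro ks
  induction ks with
  | nil => intros; simp [gRem]
  | cons k ks ih =>
    intro hk rem hlen j
    rw [gRem, ih (fun a ha => hk a (by simp [ha])) _ (by simp [hlen]) j]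
    rw [pvGetD_set _ _ _ _ _ (by rw [hlen]; exact hk k (by simp))]
    rw [List.count_cons]
    rcases eq_or_ne j k with rfl | hne
    · simp
      ring
    · rw [if_neg hne, if_neg (by simpa using Ne.symm hne)]
      push_cast
      ring

-- ===== the B loop computes refGo =====

lemma gBGo_ref (ks : List Nat) (hk : ∀ k ∈ ks, k < 26) :
    ∀ (rest pre : List Nat) (res : List Int) (start : Int) (seen : List Bool) (rem : List Int),
      ks = pre ++ rest → seen.length = 26 → rem.length = 26 →
      (∀ j, j < 26 → seen.getD j false = decide (j ∈ pre)) →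
      (∀ j, j < 26 → rem.getD j 0 = (rest.count j : Int)) →
      gBGo rest pre.length res start seen rem = refGo ks rest pre.length res start := by
  intro rest
  induction rest with
  | nil => intros; rfl
  | cons k rest ih =>
    intro pre res start seen rem hks hs hr hseen hrem
    have hk26 : k < 26 := hk k (by rw [hks]; simp)
    have hmemks : ∀ k' ∈ pre ++ [k], k' ∈ ks := by
      intro k' hk'
      rw [hks]
      rcases List.mem_append.mp hk' with h | h
      · exact List.mem_append.mpr (Or.inl h)
      · rw [List.mem_singleton.mp h]; simp
    have hseen' : ∀ j, j < 26 → (seen.set k true).getD j false = decide (j ∈ pre ++ [k]) := by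
      intro j hj
      rw [pvGetD_set _ _ _ _ _ (by omega)]
      rcases eq_or_ne j k with rfl | hne
      · simp
      · rw [if_neg hne, hseen j hj]
        simp [hne]
    have hrem' : ∀ j, j < 26 →
        (rem.set k (rem.getD k 0 - 1)).getD j 0 = (rest.count j : Int) := by
      intro j hj
      rw [pvGetD_set _ _ _ _ _ (by omega)]
      rcases eq_or_ne j k with rfl | hne
      · rw [if_pos rfl, hrem j hj, List.count_cons_self]
        push_cast
        ring
      · rw [if_neg hne, hrem j hj, List.count_cons_of_ne (Ne.symm hne)]
    have hcond : gAllDone (seen.set k true) (rem.set k (rem.getD k 0 - 1))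
        = cutAt ks pre.length := by
      rw [Bool.eq_iff_iff, cutAt, decide_eq_true_iff, take_pre ks pre rest k hks,
        drop_pre ks pre rest k hks]
      unfold gAllDone
      rw [List.all_eq_true]
      constructor
      · intro hall j hj
        have hj26 : j < 26 := hk j (hmemks j hj)
        have := hall j (List.mem_range.mpr hj26)
        rw [hseen' j hj26, hrem' j hj26] at this
        simp only [Bool.or_eq_true, Bool.not_eq_eq_eq_not, Bool.not_true, decide_eq_false_iff_not,
          beq_iff_eq] at this
        rcases this with h | h
        · exact absurd hj h
        · rw [← List.count_eq_zero]
          exact_mod_cast h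
      · intro hall j hjr
        have hj26 : j < 26 := List.mem_range.mp hjr
        rw [hseen' j hj26, hrem' j hj26]
        simp only [Bool.or_eq_true, Bool.not_eq_eq_eq_not, Bool.not_true, decide_eq_false_iff_not,
          beq_iff_eq]
        by_cases hmem : j ∈ pre ++ [k]
        · right
          rw [Int.natCast_eq_zero, List.count_eq_zero]
          exact hall j hmem
        · left
          exact hmem
    have hks' : ks = (pre ++ [k]) ++ rest := by rw [hks]; simp
    have hlen' : (pre ++ [k]).length = pre.length + 1 := by simp
    show (if gAllDone (seen.set k true) (rem.set k (rem.getD k 0 - 1)) then _ else _) = _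
    rw [hcond]
    show _ = refGo ks (k :: rest) pre.length res start
    rw [refGo]
    by_cases hc : cutAt ks pre.length = true
    · rw [if_pos hc, if_pos hc]
      have := ih (pre ++ [k]) (res ++ [(pre.length : Int) - start + 1]) ((pre.length : Int) + 1)
        (seen.set k true) (rem.set k (rem.getD k 0 - 1)) hks' (by simp [hs]) (by simp [hr])
        hseen' hrem'
      rw [hlen'] at this
      rw [this]
    · rw [if_neg hc, if_neg hc]
      have := ih (pre ++ [k]) res start (seen.set k true) (rem.set k (rem.getD k 0 - 1))
        hks' (by simp [hs]) (by simp [hr]) hseen' hrem'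
      rw [hlen'] at this
      exact this

-- ===== VERDICT (by name: the statement is the Claim_ definition above) =====
theorem func_spec : Claim_equal_func := by
  intro s _ hpre
  unfold Spec_func func func_alt
  have hb : ∀ c ∈ s.toList, 71 ≤ c.toNat ∧ c.toNat ≤ 122 := by
    intro c hc
    have := List.all_eq_true.mp hpre c hc
    simpa using this
  have hk : ∀ k ∈ s.toList.map wk, k < 26 := by
    intro k hkm
    rcases List.mem_map.mp hkm with ⟨c, hc, rfl⟩
    exact wk_lt c (hb c hc).1 (hb c hc).2
  have hLlen : (gLast (s.toList.map wk) 0 (List.replicate 26 0)).length = 26 := by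
    rw [length_gLast]; simp
  rw [pvLastLoop_eq s.toList 0 _ hb (by simp),
    pvAGo_eq _ hLlen s.toList 0 [] 0 0 hb,
    pvRemLoop_eq s.toList _ hb (by simp),
    pvBGo_eq s.toList 0 [] 0 _ _ hb (by simp) (by rw [length_gRem]; simp)]
  have hA := gAGo_ref (s.toList.map wk) hk (s.toList.map wk) [] [] 0 0 (by simp) (by simp)
  have hB := gBGo_ref (s.toList.map wk) hk (s.toList.map wk) [] [] 0
    (List.replicate 26 false) (gRem (s.toList.map wk) (List.replicate 26 0))
    (by simp) (by simp) (by rw [length_gRem]; simp)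
    (by intro j hj; rw [List.getD_replicate _ hj]; simp)
    (by
      intro j hj
      rw [gRem_getD _ hk _ (by simp) j, List.getD_replicate _ hj]
      ring)
  simp only [List.length_nil] at hA hB
  rw [hA, hB]
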